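-- pv_equiv track=rewrite | github.com/FX196/Code-Learning | Python/LeetCode/1027-Longest Arithmetic Sequence.py | longestHp
-- ===== SOURCE A (Python) =====
-- def longestHp(l, ind):
--     curr_len = 2
--     diff = l[ind] - l[0]
--     curr = l[ind]
--     l = l[ind + 1:]
--     while l:
--         if curr + diff in l:
--             f = l.index(curr + diff)
--             curr_len += 1
--             curr += diff
--             l = l[f + 1:]
--         else:
--             return curr_len
--     return curr_len
-- ===== SOURCE B (Python) =====
-- def longestHp(l, ind):
--     diff = l[ind] - l[0]
--     target = l[ind] + diff
--     count = 2
--     for x in l[ind + 1:]: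
--         if x == target:
--             count += 1
--             target += diff
--     return count
-- ===== Notes on version B (the rewrite author's own statement) =====
-- stated objective: faster
-- what changed: Replaced the repeated membership-test + index + slice loop by a single linear pass that tracks the running target value and counts matches.
import Mathlib
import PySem

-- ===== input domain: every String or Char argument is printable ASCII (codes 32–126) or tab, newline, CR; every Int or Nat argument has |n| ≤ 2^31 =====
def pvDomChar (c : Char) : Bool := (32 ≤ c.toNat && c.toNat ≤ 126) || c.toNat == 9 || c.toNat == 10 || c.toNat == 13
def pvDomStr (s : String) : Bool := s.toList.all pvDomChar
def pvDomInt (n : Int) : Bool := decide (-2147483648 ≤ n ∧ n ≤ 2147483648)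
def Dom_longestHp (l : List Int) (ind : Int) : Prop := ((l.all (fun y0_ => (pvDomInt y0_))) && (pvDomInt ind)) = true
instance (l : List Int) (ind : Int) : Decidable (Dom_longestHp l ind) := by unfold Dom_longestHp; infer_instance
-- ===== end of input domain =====

-- B replaces A's quadratic membership-test/index/slice loop by one linear scan tracking the running target value.

-- ===== PORT A =====
-- A's while loop: while l: if curr+diff in l: f = l.index(curr+diff); curr_len += 1; curr += diff; l = l[f+1:] else return curr_len
def longestHpLoopA (currLen diff curr : Int) (l : List Int) : Int :=
  if l = [] then currLen
  else if curr + diff ∈ l then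
    match hf : PySem.List.index? l (curr + diff) with
    | some f =>
        longestHpLoopA (currLen + 1) diff (curr + diff)
          (PySem.List.slice l (some ((f : Int) + 1)) none)
    | none => currLen   -- unreachable: membership just held
  else currLen
termination_by l.length
decreasing_by
  rename_i hne _
  have : (f : Int) + 1 = ((f + 1 : Nat) : Int) := by push_cast; ring
  rw [this, PySem.List.slice_from_natCast]
  simp only [List.length_drop]
  have : l.length ≠ 0 := fun h => hne (List.eq_nil_of_length_eq_zero h)
  omega

def longestHp (l : List Int) (ind : Int) : Int :=
  match PySem.List.pyGet? l ind, PySem.List.pyGet? l 0 with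
  | some li, some l0 =>
      longestHpLoopA 2 (li - l0) li (PySem.List.slice l (some (ind + 1)) none)
  | _, _ => 0          -- Python raises IndexError here; excluded by Pre_

-- ===== PORT B =====
def longestHp_alt (l : List Int) (ind : Int) : Int :=
  match PySem.List.pyGet? l ind with
  | none => 0          -- Python raises IndexError here; excluded by Pre_
  | some li =>
    match PySem.List.pyGet? l 0 with
    | none => 0        -- Python raises IndexError here; excluded by Pre_
    | some l0 =>
        let diff := li - l0
        ((PySem.List.slice l (some (ind + 1)) none).foldl
          (fun st x => if x = st.2 then (st.1 + 1, st.2 + diff) else st)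
          ((2 : Int), li + diff)).1

-- ===== PRECONDITION & SPEC =====
-- Pre_: exactly the inputs where l[ind] (and hence l[0]) does not raise IndexError.
def Pre_longestHp (l : List Int) (ind : Int) : Prop := PySem.Raise.InRange l.length ind
instance (l : List Int) (ind : Int) : Decidable (Pre_longestHp l ind) := by
  unfold Pre_longestHp; infer_instance

def pvWitness_longestHp : List Int × Int := ([0, 1, 2], 0)

def Spec_longestHp (l : List Int) (ind : Int) (out : Int) : Prop := out = longestHp_alt l ind
instance (l : List Int) (ind : Int) (out : Int) : Decidable (Spec_longestHp l ind out) := by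
  unfold Spec_longestHp; infer_instance

-- ===== CLAIM (what is proved, stated in full; the proofs are below) =====
def Claim_equal_longestHp : Prop := ∀ (l : List Int) (ind : Int), Dom_longestHp l ind → Pre_longestHp l ind → Spec_longestHp l ind (longestHp l ind)

-- ===== LEMMAS AND PROOFS =====

-- B's scan step, abbreviated for the lemmas below.
def hpStep (diff : Int) (st : Int × Int) (x : Int) : Int × Int :=
  if x = st.2 then (st.1 + 1, st.2 + diff) else st

-- If the current target does not occur in the rest, the scan leaves the state unchanged.
lemma fold_no_match (diff : Int) (l : List Int) (st : Int × Int) (h : st.2 ∉ l) :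
    l.foldl (hpStep diff) st = st := by
  induction l with
  | nil => rfl
  | cons x xs ih =>
      simp only [List.mem_cons, not_or] at h
      simp only [List.foldl_cons, hpStep, if_neg (Ne.symm h.1)]
      exact ih h.2

-- A's greedy loop equals B's linear scan.
lemma loopA_eq_fold (diff : Int) (l : List Int) (c curr : Int) :
    longestHpLoopA c diff curr l = (l.foldl (hpStep diff) (c, curr + diff)).1 := by
  rw [longestHpLoopA]
  by_cases hnil : l = []
  · subst hnil; simp
  · rw [if_neg hnil]
    by_cases hmem : curr + diff ∈ l
    · rw [if_pos hmem]
      split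
      case h_2 hf => exact absurd hmem ((PySem.List.index?_eq_none_iff _ _).mp hf)
      rename_i f hf
      obtain ⟨pre, suf, hdecomp, hlen, hnotin⟩ :=
        (PySem.List.index?_eq_some_iff _ _ _).mp hf
      have hcast : (f : Int) + 1 = ((f + 1 : Nat) : Int) := by push_cast; ring
      rw [hcast, PySem.List.slice_from_natCast]
      have hdrop : l.drop (f + 1) = suf := by
        rw [hdecomp, ← hlen,
            show pre ++ (curr + diff) :: suf = (pre ++ [curr + diff]) ++ suf by simp,
            show pre.length + 1 = (pre ++ [curr + diff]).length by simp,
            List.drop_left]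
      rw [hdrop]
      rw [loopA_eq_fold diff suf (c + 1) (curr + diff)]
      conv_rhs => rw [hdecomp]
      rw [List.foldl_append,
          fold_no_match diff pre (c, curr + diff) hnotin,
          List.foldl_cons]
      simp [hpStep]
    · rw [if_neg hmem]
      rw [fold_no_match diff l (c, curr + diff) hmem]
termination_by l.length
decreasing_by
  rw [hdecomp]; simp; omega

-- ===== VERDICT (by name: the statement is the Claim_ definition above) =====
theorem longestHp_spec : Claim_equal_longestHp := by
  intro l ind _ _
  unfold Spec_longestHp longestHp longestHp_alt
  cases h1 : PySem.List.pyGet? l ind with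
  | none => rfl
  | some li =>
      cases h0 : PySem.List.pyGet? l 0 with
      | none => rfl
      | some l0 =>
          simpa [hpStep] using
            loopA_eq_fold (li - l0) (PySem.List.slice l (some (ind + 1)) none) 2 li
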